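-- pv_equiv track=rewrite | github.com/codezone2022/acsl | 2019-20/contest2/prog/junior/string_difference.py | remove_like_LR
-- ===== SOURCE A (Python) =====
-- def remove_like_LR(s1, s2):
-- 	r1 = ''
-- 	r2 = ''
-- 	length = min(len(s1), len(s2));
-- 	for i in range(length):
-- 		if s1[i] == s2[i]:
-- 			continue
-- 		r1 += s1[i]
-- 		r2 += s2[i]
-- 	if length == len(s1):
-- 		for i in range(length, len(s2)):
-- 			r2 += s2[i]
-- 	if length == len(s2):
-- 		for i in range(length, len(s1)):
-- 			r1 += s1[i]
-- 	return r1,r2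
-- ===== SOURCE B (Python) =====
-- def remove_like_LR(s1, s2):
--     # Single descending while-loop over max(len(s1), len(s2)) building both results
--     # back-to-front; a None sentinel stands for "index past this string's end",
--     # merging A's prefix loop and its two conditional tail loops into one pass.
--     r1 = []
--     r2 = []
--     i = max(len(s1), len(s2)) - 1
--     while i >= 0:
--         c1 = s1[i] if i < len(s1) else None
--         c2 = s2[i] if i < len(s2) else None
--         if c1 != c2:
--             if c1 is not None:
--                 r1.append(c1)
--             if c2 is not None:
--                 r2.append(c2)
--         i -= 1
--     return ''.join(reversed(r1)), ''.join(reversed(r2))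
-- ===== Notes on version B (the rewrite author's own statement) =====
-- stated objective: alternative
-- what changed: Replaces A's forward prefix loop plus two conditional tail loops with one descending while-loop over max(len) that builds both results back-to-front (reversed at the end), using a past-the-end sentinel to fold the tail handling into the per-index mismatch test.
import Mathlib
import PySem

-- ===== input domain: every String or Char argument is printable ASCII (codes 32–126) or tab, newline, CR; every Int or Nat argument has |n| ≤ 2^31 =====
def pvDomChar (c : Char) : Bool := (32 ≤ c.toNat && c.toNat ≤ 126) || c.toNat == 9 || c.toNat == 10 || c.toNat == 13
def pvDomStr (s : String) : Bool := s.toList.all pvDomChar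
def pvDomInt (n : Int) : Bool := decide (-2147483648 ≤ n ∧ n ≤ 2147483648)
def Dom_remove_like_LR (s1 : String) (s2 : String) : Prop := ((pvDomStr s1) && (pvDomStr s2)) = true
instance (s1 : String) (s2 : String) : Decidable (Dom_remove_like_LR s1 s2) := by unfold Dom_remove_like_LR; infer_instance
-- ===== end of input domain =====

-- B replaces A's forward prefix loop plus two conditional tail loops by ONE descending
-- loop over max(len) that builds both results back-to-front (objective: alternative).

-- ===== PORT A =====
-- literal transliteration of A: a prefix loop over range(min), then two tail loops guarded by length tests
def remove_like_LR (s1 : String) (s2 : String) : String × String :=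
  let l1 := s1.toList
  let l2 := s2.toList
  let length := min l1.length l2.length
  let p := (List.range length).foldl
    (fun (p : List Char × List Char) i =>
      if l1.getD i ' ' == l2.getD i ' ' then p
      else (p.1 ++ [l1.getD i ' '], p.2 ++ [l2.getD i ' '])) ([], [])
  let r2 := if length = l1.length then
      (List.range' length (l2.length - length)).foldl (fun acc i => acc ++ [l2.getD i ' ']) p.2
    else p.2
  let r1 := if length = l2.length then
      (List.range' length (l1.length - length)).foldl (fun acc i => acc ++ [l1.getD i ' ']) p.1
    else p.1
  (String.ofList r1, String.ofList r2)

-- ===== PORT B =====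
-- literal transliteration of B's while-loop: the Nat argument is i+1 (0 = loop finished),
-- Option models the None sentinel for an index past a string's end, Option.toList the
-- "append if not None" pair of guards.
def pvBLoop (l1 l2 : List Char) : Nat → (List Char × List Char) → (List Char × List Char)
  | 0, acc => acc
  | i+1, acc =>
      let c1 := l1[i]?
      let c2 := l2[i]?
      let acc' :=
        if c1 = c2 then acc
        else (acc.1 ++ c1.toList, acc.2 ++ c2.toList)
      pvBLoop l1 l2 i acc'

def remove_like_LR_alt (s1 : String) (s2 : String) : String × String :=
  let l1 := s1.toList
  let l2 := s2.toList
  let p := pvBLoop l1 l2 (max l1.length l2.length) ([], [])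
  (String.ofList p.1.reverse, String.ofList p.2.reverse)

-- ===== PRECONDITION & SPEC =====
def Spec_remove_like_LR (s1 : String) (s2 : String) (out : String × String) : Prop := out = remove_like_LR_alt s1 s2
instance (s1 : String) (s2 : String) (out : String × String) : Decidable (Spec_remove_like_LR s1 s2 out) := by unfold Spec_remove_like_LR; infer_instance

-- ===== CLAIM (what is proved, stated in full; the proofs are below) =====
def Claim_equal_remove_like_LR : Prop := ∀ (s1 : String) (s2 : String), Dom_remove_like_LR s1 s2 → Spec_remove_like_LR s1 s2 (remove_like_LR s1 s2)

-- ===== LEMMAS AND PROOFS =====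

-- selected characters of the first n indices, in increasing index order
def pvSel (l1 l2 : List Char) (n : Nat) : List Char :=
  (List.range n).filterMap (fun i => if l1[i]? = l2[i]? then none else l1[i]?)

theorem pv_filterMap_singleton (f : Nat → Option Char) (n : Nat) :
    List.filterMap f [n] = (f n).toList := by
  cases h : f n <;> simp [h]

-- B's descending loop produces exactly the reversed selections appended to the accumulator.
theorem pvBLoop_spec (l1 l2 : List Char) (n : Nat) (a b : List Char) :
    pvBLoop l1 l2 n (a, b)
      = (a ++ (pvSel l1 l2 n).reverse, b ++ (pvSel l2 l1 n).reverse) := by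
  induction n generalizing a b with
  | zero => simp [pvBLoop, pvSel]
  | succ n ih =>
    have hsel : ∀ (x y : List Char), pvSel x y (n + 1)
        = pvSel x y n ++ (if x[n]? = y[n]? then none else x[n]?).toList := by
      intro x y
      simp [pvSel, List.range_succ, List.filterMap_append, pv_filterMap_singleton]
    rw [pvBLoop]
    by_cases h : l1[n]? = l2[n]?
    · rw [if_pos h, ih]
      simp [hsel, h]
    · rw [if_neg h, ih]
      have h' : ¬ (l2[n]? = l1[n]?) := fun e => h e.symm
      have ho : ∀ (o : Option Char), o.toList.reverse = o.toList := by
        intro o; cases o <;> simp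
      simp [hsel, h, h', List.reverse_append, List.append_assoc, ho]

-- the selections equal "mismatched zip pairs" plus "own tail beyond the other's length"
theorem pvSel_eq (l1 l2 : List Char) (n : Nat) :
    pvSel l1 l2 n
      = (((l1.zip l2).take n).filter (fun p => p.1 != p.2)).map Prod.fst
        ++ (l1.take n).drop l2.length := by
  induction n with
  | zero => simp [pvSel]
  | succ n ih =>
    have hstep : pvSel l1 l2 (n + 1)
        = pvSel l1 l2 n ++ (if l1[n]? = l2[n]? then none else l1[n]?).toList := by
      simp [pvSel, List.range_succ, List.filterMap_append, pv_filterMap_singleton]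
    rw [hstep, ih]
    by_cases h1 : n < l1.length
    · by_cases h2 : n < l2.length
      · -- both in range: the zip gains a pair, the tail part stays empty
        have hz : n < (l1.zip l2).length := by simp [List.length_zip]; omega
        have htake : (l1.zip l2).take (n + 1) = (l1.zip l2).take n ++ [(l1[n], l2[n])] := by
          rw [List.take_add_one]
          simp [List.getElem?_eq_getElem hz, List.getElem_zip]
        have hd : ∀ m, m ≤ n + 1 → (l1.take m).drop l2.length = [] := by
          intro m hm
          apply List.drop_eq_nil_of_le
          simp; omega
        rw [hd n (by omega), hd (n+1) (by omega), htake]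
        rw [List.getElem?_eq_getElem h1, List.getElem?_eq_getElem h2]
        by_cases hEq : l1[n] = l2[n]
        · simp [hEq]
        · simp [hEq, bne_iff_ne]
      · -- l1 in range, l2 exhausted: the character goes to the tail part
        have hzlen : (l1.zip l2).length ≤ n := by simp [List.length_zip]; omega
        have htz : ∀ m, (l1.zip l2).length ≤ m → (l1.zip l2).take m = l1.zip l2 :=
          fun m hm => List.take_of_length_le hm
        rw [htz n hzlen, htz (n+1) (by omega)]
        have ht1 : l1.take (n+1) = l1.take n ++ [l1[n]] := by
          rw [List.take_add_one]
          simp [List.getElem?_eq_getElem h1]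
        have hopt : (if l1[n]? = l2[n]? then none else l1[n]?) = some l1[n] := by
          rw [List.getElem?_eq_getElem h1, List.getElem?_eq_none (by omega)]
          simp
        rw [ht1, hopt, List.drop_append_of_le_length (by simp; omega)]
        simp [List.append_assoc]
    · -- l1 exhausted: nothing is added
      have h1' : l1[n]? = none := List.getElem?_eq_none (by omega)
      have hzlen : (l1.zip l2).length ≤ n := by simp [List.length_zip]; omega
      have htz : ∀ m, (l1.zip l2).length ≤ m → (l1.zip l2).take m = l1.zip l2 :=
        fun m hm => List.take_of_length_le hm
      rw [htz n hzlen, htz (n+1) (by omega)]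
      have ht : ∀ m, l1.length ≤ m → l1.take m = l1 := fun m hm => List.take_of_length_le hm
      rw [ht n (by omega), ht (n+1) (by omega)]
      rw [h1']
      split_ifs <;> simp

-- swapping the zip order exchanges the two projections (mismatch test is symmetric)
theorem pv_swap (l1 : List Char) : ∀ (l2 : List Char),
    ((l2.zip l1).filter (fun p => p.1 != p.2)).map Prod.fst
      = ((l1.zip l2).filter (fun p => p.1 != p.2)).map Prod.snd := by
  induction l1 with
  | nil => intro l2; cases l2 <;> simp
  | cons a t ih =>
    intro l2
    cases l2 with
    | nil => simp
    | cons b t2 =>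
      simp only [List.zip_cons_cons, List.filter_cons]
      by_cases hEq : a = b
      · simp [hEq, ih t2]
      · have h1 : (b != a) = true := by simp [bne_iff_ne]; exact fun e => hEq e.symm
        have h2 : (a != b) = true := by simp [bne_iff_ne]; exact hEq
        simp [h1, h2, ih t2]

-- A's prefix loop builds exactly the projections of the filtered zip of the first n pairs.
theorem pv_main_fold (l1 l2 : List Char) (n : Nat) (h1 : n ≤ l1.length) (h2 : n ≤ l2.length)
    (a b : List Char) :
    (List.range n).foldl
      (fun (p : List Char × List Char) i =>
        if l1.getD i ' ' == l2.getD i ' ' then p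
        else (p.1 ++ [l1.getD i ' '], p.2 ++ [l2.getD i ' '])) (a, b)
    = (a ++ (((l1.zip l2).take n).filter (fun p => p.1 != p.2)).map Prod.fst,
       b ++ (((l1.zip l2).take n).filter (fun p => p.1 != p.2)).map Prod.snd) := by
  induction n with
  | zero => simp
  | succ n ih =>
    have hn1 : n < l1.length := by omega
    have hn2 : n < l2.length := by omega
    have hz : n < (l1.zip l2).length := by simp [List.length_zip]; omega
    rw [List.range_succ, List.foldl_append]
    rw [ih (by omega) (by omega)]
    have htake : (l1.zip l2).take (n + 1) = (l1.zip l2).take n ++ [(l1[n], l2[n])] := by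
      rw [List.take_add_one]
      simp [List.getElem?_eq_getElem hz, List.getElem_zip]
    have hg1 : l1.getD n ' ' = l1[n] := by simp [List.getD_eq_getElem?_getD, List.getElem?_eq_getElem hn1]
    have hg2 : l2.getD n ' ' = l2[n] := by simp [List.getD_eq_getElem?_getD, List.getElem?_eq_getElem hn2]
    simp only [List.foldl_cons, List.foldl_nil, htake, List.filter_append, List.map_append, hg1, hg2]
    by_cases hEq : l1[n] = l2[n]
    · simp [hEq]
    · simp [hEq, bne_iff_ne, List.append_assoc]

-- A's tail loop appends exactly the suffix l.drop n.
theorem pv_tail_fold (l : List Char) (n : Nat) (hn : n ≤ l.length) (acc : List Char) :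
    (List.range' n (l.length - n)).foldl (fun acc i => acc ++ [l.getD i ' ']) acc
    = acc ++ l.drop n := by
  generalize hk : l.length - n = k
  induction k generalizing n acc with
  | zero =>
    have : l.drop n = [] := by
      apply List.drop_eq_nil_of_le; omega
    simp [this]
  | succ k ih =>
    have hn' : n < l.length := by omega
    rw [List.range'_succ, List.foldl_cons]
    rw [ih (n + 1) (by omega) (acc ++ [l.getD n ' ']) (by omega)]
    have hg : l.getD n ' ' = l[n] := by simp [List.getD_eq_getElem?_getD, List.getElem?_eq_getElem hn']
    rw [List.drop_eq_getElem_cons hn', hg, List.append_assoc]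
    rfl

-- ===== VERDICT (by name: the statement is the Claim_ definition above) =====
theorem remove_like_LR_spec : Claim_equal_remove_like_LR := by
  intro s1 s2 _hdom
  unfold Spec_remove_like_LR remove_like_LR remove_like_LR_alt
  simp only []
  set l1 := s1.toList with hl1
  set l2 := s2.toList with hl2
  rw [pv_main_fold l1 l2 (min l1.length l2.length) (Nat.min_le_left _ _) (Nat.min_le_right _ _) [] []]
  rw [pvBLoop_spec]
  simp only [List.nil_append, List.reverse_reverse]
  rw [pvSel_eq l1 l2, pvSel_eq l2 l1]
  have hz12 : (l1.zip l2).take (max l1.length l2.length) = l1.zip l2 := by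
    apply List.take_of_length_le; simp [List.length_zip]
  have hz21 : (l2.zip l1).take (max l1.length l2.length) = l2.zip l1 := by
    apply List.take_of_length_le; simp [List.length_zip]
  have ht1 : l1.take (max l1.length l2.length) = l1 :=
    List.take_of_length_le (Nat.le_max_left _ _)
  have ht2 : l2.take (max l1.length l2.length) = l2 :=
    List.take_of_length_le (Nat.le_max_right _ _)
  rw [hz12, hz21, ht1, ht2, pv_swap l1 l2]
  have hztot : (l1.zip l2).take (min l1.length l2.length) = l1.zip l2 := by
    apply List.take_of_length_le; simp [List.length_zip]
  rw [hztot]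
  rcases Nat.le_total l1.length l2.length with hle | hle
  · -- l1 shorter or equal: min = len l1
    have hmin1 : min l1.length l2.length = l1.length := by omega
    have hdrop1 : l1.drop l2.length = [] := List.drop_eq_nil_of_le hle
    rw [hmin1]
    rw [pv_tail_fold l2 l1.length hle]
    by_cases heq : l1.length = l2.length
    · simp [heq, hdrop1]
    · simp [heq, hdrop1]
  · -- l2 shorter: min = len l2
    have hmin2 : min l1.length l2.length = l2.length := by omega
    have hdrop2 : l2.drop l1.length = [] := List.drop_eq_nil_of_le hle
    rw [hmin2]
    rw [pv_tail_fold l1 l2.length hle]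
    by_cases heq : l2.length = l1.length
    · simp [heq, hdrop2]
    · simp [heq, hdrop2]
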